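-- pv_equiv track=rewrite | github.com/alanclaros/optica | reportes/ventas/rptVentasPreImpreso.py | set_puntos_string
-- ===== SOURCE A (Python) =====
-- def set_puntos_string(cadena, monto, longitud):
--     len_monto = len(monto)
--     len_cadena = len(cadena)
--     suma = len_monto + len_cadena
--     retorno = cadena
--     while suma < longitud:
--         retorno += "."
--         suma += 1
--     retorno += monto
--
--     return retorno
-- ===== SOURCE B (Python) =====
-- def set_puntos_string(cadena, monto, longitud):
--     return cadena.ljust(longitud - len(monto), ".") + monto
-- ===== Notes on version B (the rewrite author's own statement) =====
-- stated objective: idiomatic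
-- what changed: Replaces the character-by-character while loop with a single str.ljust call padding cadena to longitud - len(monto) with dots, then concatenating monto.
import Mathlib
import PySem

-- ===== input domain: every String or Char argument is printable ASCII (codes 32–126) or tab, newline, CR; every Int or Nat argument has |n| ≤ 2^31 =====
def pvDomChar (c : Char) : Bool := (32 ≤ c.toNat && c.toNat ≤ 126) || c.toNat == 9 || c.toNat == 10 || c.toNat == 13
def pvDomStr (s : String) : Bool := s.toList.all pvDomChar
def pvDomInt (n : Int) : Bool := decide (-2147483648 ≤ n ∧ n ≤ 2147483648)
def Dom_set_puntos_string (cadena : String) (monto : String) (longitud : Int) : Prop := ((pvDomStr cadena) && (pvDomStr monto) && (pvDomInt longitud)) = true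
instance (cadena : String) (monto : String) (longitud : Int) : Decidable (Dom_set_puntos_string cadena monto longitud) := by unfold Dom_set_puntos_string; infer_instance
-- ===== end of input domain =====

-- B replaces A's dot-appending while loop with one str.ljust call (idiomatic, same cost).

-- ===== PORT A =====
-- the while loop of A: while suma < longitud: retorno += "."; suma += 1
def pvLoopA (retorno : List Char) (suma longitud : Int) : List Char :=
  if suma < longitud then pvLoopA (retorno ++ ['.']) (suma + 1) longitud else retorno
termination_by (longitud - suma).toNat
decreasing_by omega

def set_puntos_string (cadena : String) (monto : String) (longitud : Int) : String :=
  let len_monto := PySem.Str.len monto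
  let len_cadena := PySem.Str.len cadena
  let suma := len_monto + len_cadena
  String.ofList (pvLoopA cadena.toList suma longitud ++ monto.toList)

-- ===== PORT B =====
-- s.ljust(w, '.') ported by hand (exact: pads on the right with '.' to width w, no-op when w ≤ len(s))
def pvLjustDots (s : List Char) (w : Int) : List Char :=
  s ++ List.replicate (w - (s.length : Int)).toNat '.'

def set_puntos_string_alt (cadena : String) (monto : String) (longitud : Int) : String :=
  String.ofList (pvLjustDots cadena.toList (longitud - PySem.Str.len monto) ++ monto.toList)

-- ===== PRECONDITION & SPEC =====
def Spec_set_puntos_string (cadena : String) (monto : String) (longitud : Int) (out : String) : Prop := out = set_puntos_string_alt cadena monto longitud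
instance (cadena : String) (monto : String) (longitud : Int) (out : String) : Decidable (Spec_set_puntos_string cadena monto longitud out) := by unfold Spec_set_puntos_string; infer_instance

-- ===== CLAIM (what is proved, stated in full; the proofs are below) =====
def Claim_equal_set_puntos_string : Prop := ∀ (cadena : String) (monto : String) (longitud : Int), Dom_set_puntos_string cadena monto longitud → Spec_set_puntos_string cadena monto longitud (set_puntos_string cadena monto longitud)

-- ===== LEMMAS AND PROOFS =====
theorem pvLoopA_eq (n : Nat) : ∀ (retorno : List Char) (suma longitud : Int),
    (longitud - suma).toNat = n →
    pvLoopA retorno suma longitud = retorno ++ List.replicate n '.' := by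
  induction n with
  | zero =>
    intro retorno suma longitud h
    rw [pvLoopA]
    simp only [List.replicate, List.append_nil]
    rw [if_neg (by omega)]
  | succ k ih =>
    intro retorno suma longitud h
    rw [pvLoopA, if_pos (by omega), ih (retorno ++ ['.']) (suma + 1) longitud (by omega)]
    simp [List.replicate_succ]

-- ===== VERDICT (by name: the statement is the Claim_ definition above) =====
theorem set_puntos_string_spec : Claim_equal_set_puntos_string := by
  intro cadena monto longitud _
  simp only [Spec_set_puntos_string, set_puntos_string, set_puntos_string_alt, pvLjustDots]
  rw [pvLoopA_eq ((longitud - (PySem.Str.len monto + PySem.Str.len cadena)).toNat) cadena.toList _ longitud rfl]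
  simp only [PySem.Str.len_eq]
  have : (longitud - ((monto.toList.length : Int) + (cadena.toList.length : Int))).toNat
      = (longitud - (monto.toList.length : Int) - (cadena.toList.length : Int)).toNat := by omega
  rw [this]
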